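-- pv_equiv track=rewrite | github.com/0mg-cc/bsky-cli | bsky_cli/organic.py | split_trailing_hashtags
-- ===== SOURCE A (Python) =====
-- def split_trailing_hashtags(text: str) -> tuple[str, str]:
--     """Split trailing hashtags from a post.
--
--     Returns (base_text, hashtags_with_leading_space_or_empty).
--
--     We only treat hashtags at the very end as hashtags, e.g.:
--     "hello world #AI #FOSS".
--     """
--     t = text.rstrip()
--     if not t:
--         return "", ""
--
--     parts = t.split()
--     i = len(parts)
--     while i > 0 and parts[i - 1].startswith("#") and len(parts[i - 1]) > 1:
--         i -= 1
--
--     if i == len(parts):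
--         return t, ""
--
--     base = " ".join(parts[:i]).rstrip()
--     tags = " ".join(parts[i:]).strip()
--     if tags:
--         tags = " " + tags
--     return base, tags
-- ===== SOURCE B (Python) =====
-- def split_trailing_hashtags(text: str) -> tuple[str, str]:
--     """Split trailing hashtags from a post (single forward pass)."""
--     t = text.rstrip()
--     if not t:
--         return "", ""
--
--     base = []
--     pending = []
--     for w in t.split():
--         if w.startswith("#") and len(w) > 1:
--             pending.append(w)
--         else:
--             base.extend(pending)
--             pending = []
--             base.append(w)
--
--     if not pending:
--         return t, ""
--     return " ".join(base), " " + " ".join(pending)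
-- ===== Notes on version B (the rewrite author's own statement) =====
-- stated objective: alternative
-- what changed: Replaced the backward while-loop that finds the boundary index (plus two slices, joins and re-strips) with a single forward pass threading base/pending accumulators, joining the accumulators directly without re-stripping.
import Mathlib
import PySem

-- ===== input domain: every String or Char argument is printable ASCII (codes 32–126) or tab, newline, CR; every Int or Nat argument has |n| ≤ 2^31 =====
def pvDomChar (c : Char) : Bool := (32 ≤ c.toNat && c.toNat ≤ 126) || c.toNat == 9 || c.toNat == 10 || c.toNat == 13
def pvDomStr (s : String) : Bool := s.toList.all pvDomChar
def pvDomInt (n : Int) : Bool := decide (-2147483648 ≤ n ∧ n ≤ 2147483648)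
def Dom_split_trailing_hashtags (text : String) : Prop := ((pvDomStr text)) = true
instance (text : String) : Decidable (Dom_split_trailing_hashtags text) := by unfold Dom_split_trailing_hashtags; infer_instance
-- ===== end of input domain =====

-- B replaces A's backward boundary scan + slices + re-strips with one forward pass
-- threading base/pending accumulators; same return value (alternative decomposition, no speed claim).

-- ===== PORT A =====
-- A's while loop: i counts down while parts[i-1] is a trailing hashtag; the index i-1
-- is always in range (1 ≤ i ≤ parts.length), so List.getD is exact here.
def aLoop (parts : List String) : Nat → Nat
  | 0 => 0
  | i + 1 =>
      if PySem.Str.startswith (parts.getD i "") "#"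
          && decide (1 < PySem.Str.len (parts.getD i "")) then
        aLoop parts i
      else
        i + 1

def split_trailing_hashtags (text : String) : String × String :=
  let t := PySem.Str.rstrip text
  if t = "" then ("", "")
  else
    let parts := PySem.Str.split₀ t
    let i := aLoop parts parts.length
    if i = parts.length then (t, "")
    else
      let base := PySem.Str.rstrip (PySem.Str.join " " (PySem.List.slice parts none (some (i : Int))))
      let tags := PySem.Str.strip (PySem.Str.join " " (PySem.List.slice parts (some (i : Int)) none))
      if tags = "" then (base, tags) else (base, " " ++ tags)

-- ===== PORT B =====
def bLoop : List String → List String → List String → List String × List String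
  | [], base, pending => (base, pending)
  | w :: ws, base, pending =>
      if PySem.Str.startswith w "#" && decide (1 < PySem.Str.len w) then
        bLoop ws base (pending ++ [w])
      else
        bLoop ws (base ++ pending ++ [w]) []

def split_trailing_hashtags_alt (text : String) : String × String :=
  let t := PySem.Str.rstrip text
  if t = "" then ("", "")
  else
    let bp := bLoop (PySem.Str.split₀ t) [] []
    if bp.2 = [] then (t, "")
    else (PySem.Str.join " " bp.1, " " ++ PySem.Str.join " " bp.2)

-- ===== PRECONDITION & SPEC =====
def Spec_split_trailing_hashtags (text : String) (out : String × String) : Prop := out = split_trailing_hashtags_alt text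
instance (text : String) (out : String × String) : Decidable (Spec_split_trailing_hashtags text out) := by unfold Spec_split_trailing_hashtags; infer_instance

-- ===== CLAIM (what is proved, stated in full; the proofs are below) =====
def Claim_equal_split_trailing_hashtags : Prop := ∀ (text : String), Dom_split_trailing_hashtags text → Spec_split_trailing_hashtags text (split_trailing_hashtags text)

-- ===== LEMMAS AND PROOFS =====

def pvIsTag (w : String) : Bool :=
  PySem.Str.startswith w "#" && decide (1 < PySem.Str.len w)

def pvGood (p : List Char) : Prop :=
  p ≠ [] ∧ ∀ c ∈ p, PySem.Chars.isspace c = false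

theorem go_good : ∀ (s cur : List Char) (acc : List (List Char)),
    (∀ c ∈ cur, PySem.Chars.isspace c = false) →
    (∀ p ∈ acc, pvGood p) →
    ∀ p ∈ PySem.Chars.split₀.go s cur acc, pvGood p := by
  intro s
  induction s with
  | nil =>
    intro cur acc hcur hacc p hp
    rw [PySem.Chars.split₀.go] at hp
    split at hp
    · exact hacc p (by simpa using hp)
    · rename_i hne
      rw [List.mem_reverse, List.mem_cons] at hp
      rcases hp with rfl | hp
      · refine ⟨by simpa using hne, fun c hc => hcur c (by simpa using hc)⟩
      · exact hacc p hp
  | cons c rest ih =>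
    intro cur acc hcur hacc p hp
    rw [PySem.Chars.split₀.go] at hp
    split at hp
    · split at hp
      · exact ih [] acc (by simp) hacc p hp
      · rename_i hne
        refine ih [] (cur.reverse :: acc) (by simp) ?_ p hp
        intro q hq
        rcases List.mem_cons.mp hq with rfl | hq
        · exact ⟨by simpa using hne, fun d hd => hcur d (by simpa using hd)⟩
        · exact hacc q hq
    · rename_i hcsp
      refine ih (c :: cur) acc ?_ hacc p hp
      intro d hd
      rcases List.mem_cons.mp hd with rfl | hd
      · exact Bool.not_eq_true _ ▸ (by simpa using hcsp)
      · exact hcur d hd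

theorem split₀_good (t : String) :
    ∀ w ∈ PySem.Str.split₀ t, pvGood w.toList := by
  intro w hw
  have : w.toList ∈ PySem.Chars.split₀ t.toList := by
    rw [← PySem.Str.split₀_map_toList]
    exact List.mem_map_of_mem hw
  exact go_good t.toList [] [] (by simp) (by simp) _ this

theorem rstrip_prepend (X Y : List Char) (hY : PySem.Chars.rstrip Y = Y) (hne : Y ≠ []) :
    PySem.Chars.rstrip (X ++ Y) = X ++ Y := by
  have hdw : List.dropWhile PySem.Chars.isspace Y.reverse = Y.reverse := by
    have := congrArg List.reverse hY
    simpa [PySem.Chars.rstrip] using this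
  obtain ⟨c, cs, hYr⟩ : ∃ c cs, Y.reverse = c :: cs := by
    cases h : Y.reverse with
    | nil => exact absurd (by simpa using h) hne
    | cons c cs => exact ⟨c, cs, rfl⟩
  have hc : PySem.Chars.isspace c = false := by
    rw [hYr] at hdw
    by_contra hcc
    simp only [Bool.not_eq_false] at hcc
    rw [List.dropWhile_cons_of_pos hcc] at hdw
    have := congrArg List.length hdw
    simp at this
    have h2 := List.length_dropWhile_le (p := PySem.Chars.isspace) (l := cs)
    omega
  have : PySem.Chars.rstrip (X ++ Y)
      = (List.dropWhile PySem.Chars.isspace (Y.reverse ++ X.reverse)).reverse := by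
    simp [PySem.Chars.rstrip]
  rw [this, hYr, List.cons_append, List.dropWhile_cons_of_neg (by simp [hc]), ← List.cons_append, ← hYr]
  simp

theorem rstrip_good (w : List Char) (h : pvGood w) :
    PySem.Chars.rstrip w = w := by
  obtain ⟨hne, hsp⟩ := h
  have : PySem.Chars.rstrip ([] ++ w) = [] ++ w := by
    apply rstrip_prepend
    · have hdw : List.dropWhile PySem.Chars.isspace w.reverse = w.reverse := by
        rw [List.dropWhile_eq_self_iff]
        intro hl
        have hl' : w.length - 1 < w.length := by
          have : w.length ≠ 0 := fun h0 => hne (List.eq_nil_of_length_eq_zero h0)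
          omega
        simp [hsp _ (List.getElem_mem hl')]
      simp [PySem.Chars.rstrip, hdw]
    · exact hne
  simpa using this

theorem join_ne_nil (sp w : List Char) (ws : List (List Char)) (h : w ≠ []) :
    PySem.Chars.join sp (w :: ws) ≠ [] := by
  cases ws with
  | nil => simpa [PySem.Chars.join_singleton] using h
  | cons v rest =>
    rw [PySem.Chars.join_cons_cons]
    simp [h]

theorem rstrip_join (sp : List Char) (ws : List (List Char))
    (h : ∀ w ∈ ws, pvGood w) :
    PySem.Chars.rstrip (PySem.Chars.join sp ws) = PySem.Chars.join sp ws := by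
  induction ws with
  | nil => simp [PySem.Chars.join_nil, PySem.Chars.rstrip]
  | cons w rest ih =>
    cases rest with
    | nil =>
      rw [PySem.Chars.join_singleton]
      exact rstrip_good w (h w (by simp))
    | cons v rest' =>
      rw [PySem.Chars.join_cons_cons]
      have hY := ih (fun u hu => h u (by simp [hu]))
      have hgv := h v (by simp)
      have hne := join_ne_nil sp v rest' hgv.1
      have := rstrip_prepend (w ++ sp) (PySem.Chars.join sp (v :: rest')) hY hne
      simpa [List.append_assoc] using this

theorem lstrip_join (sp : List Char) (ws : List (List Char))
    (h : ∀ w ∈ ws, pvGood w) :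
    PySem.Chars.lstrip (PySem.Chars.join sp ws) = PySem.Chars.join sp ws := by
  cases ws with
  | nil => simp [PySem.Chars.join_nil, PySem.Chars.lstrip]
  | cons w rest =>
    obtain ⟨hne, hsp⟩ := h w (by simp)
    obtain ⟨c, cs, rfl⟩ : ∃ c cs, w = c :: cs := by
      cases w with
      | nil => exact absurd rfl hne
      | cons c cs => exact ⟨c, cs, rfl⟩
    have hc : PySem.Chars.isspace c = false := hsp c (by simp)
    have hshape : ∃ R, PySem.Chars.join sp ((c :: cs) :: rest) = c :: (cs ++ R) := by
      cases rest with
      | nil => exact ⟨[], by simp [PySem.Chars.join_singleton]⟩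
      | cons v rest' =>
        exact ⟨sp ++ PySem.Chars.join sp (v :: rest'), by
          rw [PySem.Chars.join_cons_cons]; simp⟩
    obtain ⟨R, hR⟩ := hshape
    rw [hR, PySem.Chars.lstrip, List.dropWhile_cons_of_neg (by simp [hc])]

theorem strip_join (sp : List Char) (ws : List (List Char))
    (h : ∀ w ∈ ws, pvGood w) :
    PySem.Chars.strip (PySem.Chars.join sp ws) = PySem.Chars.join sp ws := by
  rw [PySem.Chars.strip, lstrip_join sp ws h, rstrip_join sp ws h]

theorem aLoop_append (l : List String) (x : String) : ∀ i, i ≤ l.length →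
    aLoop (l ++ [x]) i = aLoop l i := by
  intro i
  induction i with
  | zero => intro _; rfl
  | succ j ih =>
    intro h
    have hj : j < l.length := by omega
    have hg : (l ++ [x]).getD j "" = l.getD j "" := by
      simp [List.getD, List.getElem?_append_left hj]
    simp only [aLoop, hg]
    split
    · exact ih (by omega)
    · rfl

theorem aLoop_spec (pre suf : List String)
    (hpre : pre = [] ∨ ∃ (h : pre ≠ []), pvIsTag (pre.getLast h) = false)
    (hsuf : ∀ w ∈ suf, pvIsTag w = true) :
    aLoop (pre ++ suf) (pre ++ suf).length = pre.length := by
  induction suf using List.reverseRecOn with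
  | nil =>
    simp only [List.append_nil]
    rcases hpre with h | ⟨h, hl⟩
    · subst h; rfl
    · obtain ⟨l', v, rfl⟩ := (List.eq_nil_or_concat pre).resolve_left h
      simp only [List.concat_eq_append] at hl ⊢
      have hg : (l' ++ [v]).getD l'.length "" = v := by
        simp [List.getD]
      have hv : pvIsTag v = false := by
        simpa [List.getLast_append] using hl
      have hlen : (l' ++ [v]).length = l'.length + 1 := by simp
      rw [hlen]
      simp only [aLoop, hg]
      have hv' : (PySem.Str.startswith v "#" && decide (1 < PySem.Str.len v)) = false := hv
      rw [hv']
      simp [hlen]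
  | append_singleton suf' w ih =>
    have hw : pvIsTag w = true := hsuf w (by simp)
    have hmem : ∀ u ∈ suf', pvIsTag u = true := fun u hu => hsuf u (by simp [hu])
    have hlen : (pre ++ (suf' ++ [w])).length = (pre ++ suf').length + 1 := by
      simp only [List.length_append, List.length_cons, List.length_nil]; omega
    have hassoc : pre ++ (suf' ++ [w]) = (pre ++ suf') ++ [w] := by simp
    rw [hlen, hassoc]
    have hg : ((pre ++ suf') ++ [w]).getD (pre ++ suf').length "" = w := by
      simp [List.getD]
    simp only [aLoop, hg]
    have : (PySem.Str.startswith w "#" && decide (1 < PySem.Str.len w)) = true := hw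
    rw [this]
    simp only [if_pos rfl]
    rw [aLoop_append _ _ _ (le_refl _)]
    exact ih hmem

theorem bLoop_tags (suf : List String) (hsuf : ∀ w ∈ suf, pvIsTag w = true) :
    ∀ base pending, bLoop suf base pending = (base, pending ++ suf) := by
  induction suf with
  | nil => intro base pending; simp [bLoop]
  | cons w ws ih =>
    intro base pending
    have hw : (PySem.Str.startswith w "#" && decide (1 < PySem.Str.len w)) = true :=
      hsuf w (by simp)
    simp only [bLoop, hw, if_pos rfl]
    rw [ih (fun u hu => hsuf u (by simp [hu]))]
    simp

theorem bLoop_flush (pre : List String) (h : pre ≠ [])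
    (hlast : pvIsTag (pre.getLast h) = false) :
    ∀ suf base pending, bLoop (pre ++ suf) base pending = bLoop suf (base ++ pending ++ pre) [] := by
  induction pre with
  | nil => exact absurd rfl h
  | cons w rest ih =>
    intro suf base pending
    by_cases hw : (PySem.Str.startswith w "#" && decide (1 < PySem.Str.len w)) = true
    · have hrest : rest ≠ [] := by
        rintro rfl
        have hfw : pvIsTag w = false := hlast
        exact Bool.false_ne_true (hfw.symm.trans hw)
      have hl' : pvIsTag (rest.getLast hrest) = false := by
        rwa [List.getLast_cons hrest] at hlast
      simp only [List.cons_append, bLoop, hw, if_pos rfl]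
      rw [ih hrest hl' suf base (pending ++ [w])]
      simp
    · simp only [List.cons_append, bLoop, hw, if_neg hw]
      rcases eq_or_ne rest [] with rfl | hrest
      · simp
      · have hl' : pvIsTag (rest.getLast hrest) = false := by
          rwa [List.getLast_cons hrest] at hlast
        rw [ih hrest hl' suf (base ++ pending ++ [w]) []]
        simp

theorem bLoop_spec (pre suf : List String)
    (hpre : pre = [] ∨ ∃ (h : pre ≠ []), pvIsTag (pre.getLast h) = false)
    (hsuf : ∀ w ∈ suf, pvIsTag w = true) :
    bLoop (pre ++ suf) [] [] = (pre, suf) := by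
  rcases hpre with rfl | ⟨h, hl⟩
  · simpa using bLoop_tags suf hsuf [] []
  · rw [bLoop_flush pre h hl suf [] []]
    simpa using bLoop_tags suf hsuf pre []


theorem str_eq_of_toList (s t : String) (h : s.toList = t.toList) : s = t :=
  String.toList_inj.mp h

def pvPre (parts : List String) : List String := (parts.reverse.dropWhile pvIsTag).reverse

def pvSuf (parts : List String) : List String := (parts.reverse.takeWhile pvIsTag).reverse

theorem pv_decomp (parts : List String) : parts = pvPre parts ++ pvSuf parts := by
  rw [pvPre, pvSuf, ← List.reverse_append, List.takeWhile_append_dropWhile, List.reverse_reverse]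

theorem pv_suf_tags (parts : List String) : ∀ w ∈ pvSuf parts, pvIsTag w = true := by
  intro w hw
  exact List.mem_takeWhile_imp (List.mem_reverse.mp hw)

theorem pv_pre_last (parts : List String) :
    pvPre parts = [] ∨ ∃ (h : pvPre parts ≠ []), pvIsTag ((pvPre parts).getLast h) = false := by
  by_cases hr : parts.reverse.dropWhile pvIsTag = []
  · left; rw [pvPre, hr]; rfl
  · right
    have hne : pvPre parts ≠ [] := by rw [pvPre]; simpa using hr
    refine ⟨hne, ?_⟩
    have h2 : (parts.reverse.dropWhile pvIsTag).reverse ≠ [] := hne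
    show pvIsTag ((parts.reverse.dropWhile pvIsTag).reverse.getLast h2) = false
    rw [List.getLast_reverse h2]
    exact List.head_dropWhile_not pvIsTag _

theorem aLoop_eval (parts : List String) :
    aLoop parts parts.length = (pvPre parts).length := by
  conv_lhs => rw [pv_decomp parts]
  exact aLoop_spec _ _ (pv_pre_last parts) (pv_suf_tags parts)

theorem bLoop_eval (parts : List String) :
    bLoop parts [] [] = (pvPre parts, pvSuf parts) := by
  conv_lhs => rw [pv_decomp parts]
  exact bLoop_spec _ _ (pv_pre_last parts) (pv_suf_tags parts)

theorem good_map (parts : List String) (sub : List String)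
    (hsub : ∀ w ∈ sub, w ∈ parts) (hgood : ∀ w ∈ parts, pvGood w.toList) :
    ∀ p ∈ sub.map String.toList, pvGood p := by
  intro p hp
  obtain ⟨w, hw, rfl⟩ := List.mem_map.mp hp
  exact hgood w (hsub w hw)

theorem split_trailing_hashtags_spec_aux (text : String) :
    split_trailing_hashtags text = split_trailing_hashtags_alt text := by
  by_cases ht : PySem.Str.rstrip text = ""
  · simp [split_trailing_hashtags, split_trailing_hashtags_alt, ht]
  · have hgood : ∀ w ∈ PySem.Str.split₀ (PySem.Str.rstrip text), pvGood w.toList :=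
      split₀_good (PySem.Str.rstrip text)
    simp only [split_trailing_hashtags, split_trailing_hashtags_alt, if_neg ht,
      aLoop_eval, bLoop_eval]
    by_cases hsn : pvSuf (PySem.Str.split₀ (PySem.Str.rstrip text)) = []
    · have hlen : (pvPre (PySem.Str.split₀ (PySem.Str.rstrip text))).length
          = (PySem.Str.split₀ (PySem.Str.rstrip text)).length := by
        conv_rhs => rw [pv_decomp (PySem.Str.split₀ (PySem.Str.rstrip text))]
        rw [hsn]; simp
      simp [hsn, hlen]
    · have hlen : (pvPre (PySem.Str.split₀ (PySem.Str.rstrip text))).length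
          ≠ (PySem.Str.split₀ (PySem.Str.rstrip text)).length := by
        conv_rhs => rw [pv_decomp (PySem.Str.split₀ (PySem.Str.rstrip text))]
        simp only [List.length_append]
        have : pvSuf (PySem.Str.split₀ (PySem.Str.rstrip text)) ≠ [] := hsn
        have h0 : (pvSuf (PySem.Str.split₀ (PySem.Str.rstrip text))).length ≠ 0 := by
          simpa [List.length_eq_zero_iff] using this
        omega
      have htake : PySem.List.slice (PySem.Str.split₀ (PySem.Str.rstrip text)) none
            (some ((pvPre (PySem.Str.split₀ (PySem.Str.rstrip text))).length : Int))
          = pvPre (PySem.Str.split₀ (PySem.Str.rstrip text)) := by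
        rw [PySem.List.slice_to _ (Int.natCast_nonneg _)]
        rw [Int.toNat_natCast]
        have key : ∀ (L pre suf : List String), L = pre ++ suf → List.take pre.length L = pre := by
          rintro L pre suf rfl; exact List.take_left
        exact key _ _ _ (pv_decomp _)
      have hdrop : PySem.List.slice (PySem.Str.split₀ (PySem.Str.rstrip text))
            (some ((pvPre (PySem.Str.split₀ (PySem.Str.rstrip text))).length : Int)) none
          = pvSuf (PySem.Str.split₀ (PySem.Str.rstrip text)) := by
        rw [PySem.List.slice_from _ (Int.natCast_nonneg _)]
        rw [Int.toNat_natCast]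
        have key : ∀ (L pre suf : List String), L = pre ++ suf → List.drop pre.length L = suf := by
          rintro L pre suf rfl; exact List.drop_left
        exact key _ _ _ (pv_decomp _)
      have hpremem : ∀ w ∈ pvPre (PySem.Str.split₀ (PySem.Str.rstrip text)),
          w ∈ PySem.Str.split₀ (PySem.Str.rstrip text) := by
        intro w hw
        have h1 : w ∈ pvPre (PySem.Str.split₀ (PySem.Str.rstrip text))
            ++ pvSuf (PySem.Str.split₀ (PySem.Str.rstrip text)) := List.mem_append_left _ hw
        rwa [← pv_decomp] at h1
      have hsufmem : ∀ w ∈ pvSuf (PySem.Str.split₀ (PySem.Str.rstrip text)),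
          w ∈ PySem.Str.split₀ (PySem.Str.rstrip text) := by
        intro w hw
        have h1 : w ∈ pvPre (PySem.Str.split₀ (PySem.Str.rstrip text))
            ++ pvSuf (PySem.Str.split₀ (PySem.Str.rstrip text)) := List.mem_append_right _ hw
        rwa [← pv_decomp] at h1
      have hbase : PySem.Str.rstrip (PySem.Str.join " "
            (pvPre (PySem.Str.split₀ (PySem.Str.rstrip text))))
          = PySem.Str.join " " (pvPre (PySem.Str.split₀ (PySem.Str.rstrip text))) := by
        apply str_eq_of_toList
        rw [PySem.Str.toList_rstrip, PySem.Str.toList_join]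
        exact rstrip_join _ _ (good_map _ _ hpremem hgood)
      have htags : PySem.Str.strip (PySem.Str.join " "
            (pvSuf (PySem.Str.split₀ (PySem.Str.rstrip text))))
          = PySem.Str.join " " (pvSuf (PySem.Str.split₀ (PySem.Str.rstrip text))) := by
        apply str_eq_of_toList
        rw [PySem.Str.toList_strip, PySem.Str.toList_join]
        exact strip_join _ _ (good_map _ _ hsufmem hgood)
      have htne : PySem.Str.join " " (pvSuf (PySem.Str.split₀ (PySem.Str.rstrip text))) ≠ "" := by
        obtain ⟨w, rest, hwr⟩ : ∃ w rest,
            pvSuf (PySem.Str.split₀ (PySem.Str.rstrip text)) = w :: rest := by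
          cases h : pvSuf (PySem.Str.split₀ (PySem.Str.rstrip text)) with
          | nil => exact absurd h hsn
          | cons w rest => exact ⟨w, rest, rfl⟩
        intro hcon
        have h1 := congrArg String.toList hcon
        rw [PySem.Str.toList_join, hwr] at h1
        simp only [List.map_cons] at h1
        have hg := hgood w (hsufmem w (by rw [hwr]; simp))
        exact join_ne_nil " ".toList w.toList (rest.map String.toList) hg.1 (by simpa using h1)
      rw [htake, hdrop, htags]
      simp [hlen, hsn, hbase, htne]

theorem split_trailing_hashtags_spec : Claim_equal_split_trailing_hashtags := by
  intro text _
  exact split_trailing_hashtags_spec_aux text
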